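-- pv_equiv track=rewrite | github.com/cseelhoff/todin | scripts/extract_entities.py | decode_one
-- ===== SOURCE A (Python) =====
-- PRIMS = {
--     "B": "byte", "C": "char", "D": "double", "F": "float",
--     "I": "int",  "J": "long", "S": "short",  "Z": "boolean",
--     "V": "void",
-- }
--
-- def decode_one(buf: str, i: int) -> tuple[str, int]:
--     arr = 0
--     while i < len(buf) and buf[i] == "[":
--         arr += 1
--         i += 1
--     c = buf[i]
--     if c in PRIMS:
--         out = PRIMS[c]
--         i += 1
--     elif c == "L":
--         end = buf.index(";", i)
--         out = buf[i + 1:end].replace("/", ".")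
--         i = end + 1
--     else:
--         raise ValueError(f"bad descriptor {buf!r} at {i}")
--     return out + ("[]" * arr), i
-- ===== SOURCE B (Python) =====
-- PRIMS = {
--     "B": "byte", "C": "char", "D": "double", "F": "float",
--     "I": "int",  "J": "long", "S": "short",  "Z": "boolean",
--     "V": "void",
-- }
--
-- def decode_one(buf: str, i: int) -> tuple[str, int]:
--     # Recurse over the nested-array grammar: peel one '[' per call and append
--     # the '[]' suffix on the unwind, threading the position through the result,
--     # instead of counting brackets in a loop.
--     if i < len(buf) and buf[i] == "[":
--         out, j = decode_one(buf, i + 1)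
--         return out + "[]", j
--     c = buf[i]
--     if c in PRIMS:
--         return PRIMS[c], i + 1
--     if c == "L":
--         end = buf.index(";", i)
--         return buf[i + 1:end].replace("/", "."), end + 1
--     raise ValueError(f"bad descriptor {buf!r} at {i}")
-- ===== Notes on version B (the rewrite author's own statement) =====
-- stated objective: alternative
-- what changed: B replaces A's bracket-counting while loop plus one '[]'*arr repetition by recursion over the nested-array grammar: each call peels one '[', recurses, and appends '[]' on the unwind, threading the resulting position through the return value.
import Mathlib
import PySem

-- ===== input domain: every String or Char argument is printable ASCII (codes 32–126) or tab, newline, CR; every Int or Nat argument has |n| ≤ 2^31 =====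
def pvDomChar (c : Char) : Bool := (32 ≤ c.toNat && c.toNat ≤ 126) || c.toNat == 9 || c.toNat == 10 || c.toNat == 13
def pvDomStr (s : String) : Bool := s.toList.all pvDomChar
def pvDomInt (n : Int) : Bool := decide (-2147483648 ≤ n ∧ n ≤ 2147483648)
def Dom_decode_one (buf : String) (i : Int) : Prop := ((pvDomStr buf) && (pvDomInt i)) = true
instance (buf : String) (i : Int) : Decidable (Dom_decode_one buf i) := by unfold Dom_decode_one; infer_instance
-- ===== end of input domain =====

-- B replaces A's bracket-counting while loop + '[]'*arr repetition by recursion over the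
-- nested-array grammar, appending '[]' on the unwind (objective: alternative decomposition).

-- shared module constant: the PRIMS dict of Source A / Source B
def pvPrims : PySem.Dict Char (List Char) :=
  PySem.Dict.ofList [('B', "byte".toList), ('C', "char".toList), ('D', "double".toList),
    ('F', "float".toList), ('I', "int".toList), ('J', "long".toList), ('S', "short".toList),
    ('Z', "boolean".toList), ('V', "void".toList)]

-- ===== PORT A =====
-- Python's "[]" * arr
def pvBrk : Nat → List Char
  | 0 => []
  | n + 1 => pvBrk n ++ ['[', ']']

-- the while loop: 'while i < len(buf) and buf[i] == "[": arr += 1; i += 1'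
def pvSkipA (cs : List Char) (arr : Nat) (i : Int) : Nat × Int :=
  if h : i < (cs.length : Int) ∧ PySem.List.pyGet? cs i = some '[' then
    pvSkipA cs (arr + 1) (i + 1)
  else (arr, i)
termination_by ((cs.length : Int) - i).toNat
decreasing_by obtain ⟨h1, -⟩ := h; omega

-- after the loop: 'c = buf[i]; if c in PRIMS … elif c == "L" … else raise'
def pvBaseA (cs : List Char) (i : Int) : List Char × Int :=
  match PySem.List.pyGet? cs i with
  | none => ([], i)                  -- IndexError at 'c = buf[i]': excluded by Pre_
  | some c =>
    match pvPrims.get? c with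
    | some out => (out, i + 1)
    | none =>
      if c = 'L' then
        let e := PySem.Chars.findFrom cs [';'] i none
        if e = -1 then ([], i)       -- ValueError from buf.index: excluded by Pre_
        else (PySem.Chars.replace (PySem.List.slice cs (some (i + 1)) (some e)) ['/'] ['.'], e + 1)
      else ([], i)                   -- 'raise ValueError(...)': excluded by Pre_

def decode_one (buf : String) (i : Int) : String × Int :=
  let cs := buf.toList
  let p := pvSkipA cs 0 i
  let r := pvBaseA cs p.2
  (String.ofList (r.1 ++ pvBrk p.1), r.2)

-- ===== PORT B =====
-- Source B's recursion: peel one '[', recurse, append "[]" on the unwind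
def pvDecodeB (cs : List Char) (i : Int) : List Char × Int :=
  if h : i < (cs.length : Int) ∧ PySem.List.pyGet? cs i = some '[' then
    let r := pvDecodeB cs (i + 1)
    (r.1 ++ ['[', ']'], r.2)
  else
    match PySem.List.pyGet? cs i with
    | none => ([], i)                -- IndexError at 'c = buf[i]': excluded by Pre_
    | some c =>
      match pvPrims.get? c with
      | some out => (out, i + 1)
      | none =>
        if c = 'L' then
          let e := PySem.Chars.findFrom cs [';'] i none
          if e = -1 then ([], i)     -- ValueError from buf.index: excluded by Pre_
          else (PySem.Chars.replace (PySem.List.slice cs (some (i + 1)) (some e)) ['/'] ['.'], e + 1)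
        else ([], i)                 -- 'raise ValueError(...)': excluded by Pre_
termination_by ((cs.length : Int) - i).toNat
decreasing_by obtain ⟨h1, -⟩ := h; omega

def decode_one_alt (buf : String) (i : Int) : String × Int :=
  let r := pvDecodeB buf.toList i
  (String.ofList r.1, r.2)

-- ===== PRECONDITION & SPEC =====
-- Pre_ holds exactly when A returns normally: after a (possibly wrapped, Python negative
-- indexing) run of d leading '[' characters from position i there is an in-range character
-- that is a primitive code, or 'L' with a later ';'. It excludes only inputs on which A
-- raises (IndexError at buf[i], or ValueError from a bad descriptor char / missing ';').
def Pre_decode_one (buf : String) (i : Int) : Prop :=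
  ∃ d ≤ 2 * buf.toList.length,
    i + (d : Int) < (buf.toList.length : Int) ∧
    (∀ k < d, PySem.List.pyGet? buf.toList (i + (k : Int)) = some '[') ∧
    ((PySem.List.pyGet? buf.toList (i + (d : Int))).any (fun c =>
        ['B', 'C', 'D', 'F', 'I', 'J', 'S', 'Z', 'V'].contains c ||
        (c == 'L' && !(PySem.Chars.findFrom buf.toList [';'] (i + (d : Int)) none == -1))) = true)
instance (buf : String) (i : Int) : Decidable (Pre_decode_one buf i) := by
  unfold Pre_decode_one; infer_instance

def pvWitness_decode_one : String × Int := ("[I", 0)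

def Spec_decode_one (buf : String) (i : Int) (out : String × Int) : Prop := out = decode_one_alt buf i
instance (buf : String) (i : Int) (out : String × Int) : Decidable (Spec_decode_one buf i out) := by unfold Spec_decode_one; infer_instance

-- ===== CLAIM (what is proved, stated in full; the proofs are below) =====
def Claim_equal_decode_one : Prop := ∀ (buf : String) (i : Int), Dom_decode_one buf i → Pre_decode_one buf i → Spec_decode_one buf i (decode_one buf i)

-- ===== LEMMAS AND PROOFS =====

-- A's loop with a nonzero starting accumulator just shifts the count
theorem pvSkipA_shift (cs : List Char) (n : Nat) :
    ∀ (arr : Nat) (i : Int), ((cs.length : Int) - i).toNat ≤ n →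
      pvSkipA cs arr i = (arr + (pvSkipA cs 0 i).1, (pvSkipA cs 0 i).2) := by
  induction n with
  | zero =>
    intro arr i hn
    have hne : ¬(i < (cs.length : Int) ∧ PySem.List.pyGet? cs i = some '[') := by
      rintro ⟨h1, -⟩; omega
    conv_lhs => rw [pvSkipA]
    conv_rhs => rw [pvSkipA]
    rw [dif_neg hne, dif_neg hne]
    simp
  | succ n ih =>
    intro arr i hn
    conv_lhs => rw [pvSkipA]
    conv_rhs => rw [pvSkipA]
    by_cases h : i < (cs.length : Int) ∧ PySem.List.pyGet? cs i = some '['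
    · rw [dif_pos h, dif_pos h]
      obtain ⟨h1, -⟩ := h
      rw [ih (arr + 1) (i + 1) (by omega), ih (0 + 1) (i + 1) (by omega)]
      refine Prod.ext ?_ rfl
      simp; omega
    · rw [dif_neg h, dif_neg h]
      simp

-- B's recursion computes A's loop-then-base-then-suffix result
theorem pvDecodeB_eq_aux (cs : List Char) (n : Nat) :
    ∀ (i : Int), ((cs.length : Int) - i).toNat ≤ n →
      pvDecodeB cs i =
        ((pvBaseA cs (pvSkipA cs 0 i).2).1 ++ pvBrk (pvSkipA cs 0 i).1,
         (pvBaseA cs (pvSkipA cs 0 i).2).2) := by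
  induction n with
  | zero =>
    intro i hn
    have hne : ¬(i < (cs.length : Int) ∧ PySem.List.pyGet? cs i = some '[') := by
      rintro ⟨h1, -⟩; omega
    conv_lhs => rw [pvDecodeB]
    conv_rhs => rw [pvSkipA]
    rw [dif_neg hne, dif_neg hne]
    show pvBaseA cs i = _
    simp [pvBrk]
  | succ n ih =>
    intro i hn
    conv_lhs => rw [pvDecodeB]
    conv_rhs => rw [pvSkipA]
    by_cases h : i < (cs.length : Int) ∧ PySem.List.pyGet? cs i = some '['
    · rw [dif_pos h, dif_pos h]
      obtain ⟨h1, -⟩ := h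
      rw [ih (i + 1) (by omega), pvSkipA_shift cs n (0 + 1) (i + 1) (by omega)]
      have hb : 0 + 1 + (pvSkipA cs 0 (i + 1)).1 = (pvSkipA cs 0 (i + 1)).1 + 1 := by omega
      simp [hb, pvBrk]
    · rw [dif_neg h, dif_neg h]
      simp
      show pvBaseA cs i = _
      simp [pvBrk]

-- ===== VERDICT (by name: the statement is the Claim_ definition above) =====
theorem decode_one_spec : Claim_equal_decode_one := by
  intro buf i _ _
  unfold Spec_decode_one decode_one decode_one_alt
  rw [pvDecodeB_eq_aux buf.toList ((buf.toList.length : Int) - i).toNat i le_rfl]
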